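-- pv_equiv track=rewrite | github.com/d1ssmuss/Egor-labs_AISD | main6.py | distribute_items_algorithmic
-- ===== SOURCE A (Python) =====
-- def distribute_items_algorithmic(T, K):
--     if K == 0:
--         return [[]] if T == 0 else []
--
--     result = []
--     for i in range(T + 1):
--         for distribution in distribute_items_algorithmic(T - i, K - 1):
--             result.append([i] + distribution)
--     return result
-- ===== SOURCE B (Python) =====
-- from itertools import combinations
--
-- def distribute_items_algorithmic(T, K):
--     # stars-and-bars: choose K-1 bar positions among T+K-1 slots; gaps = bin sizes
--     if K == 0:
--         return [[]] if T == 0 else []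
--     if T < 0:
--         return []
--     result = []
--     for bars in combinations(range(T + K - 1), K - 1):
--         prev = -1
--         bins = []
--         for b in bars:
--             bins.append(b - prev - 1)
--             prev = b
--         bins.append(T + K - 1 - prev - 1)
--         result.append(bins)
--     return result
-- ===== Notes on version B (the rewrite author's own statement) =====
-- stated objective: alternative
-- what changed: Replaces the exponential branching recursion with a non-recursive stars-and-bars enumeration: itertools.combinations picks K-1 bar positions and each composition is read off as the gaps between bars.
import Mathlib
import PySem

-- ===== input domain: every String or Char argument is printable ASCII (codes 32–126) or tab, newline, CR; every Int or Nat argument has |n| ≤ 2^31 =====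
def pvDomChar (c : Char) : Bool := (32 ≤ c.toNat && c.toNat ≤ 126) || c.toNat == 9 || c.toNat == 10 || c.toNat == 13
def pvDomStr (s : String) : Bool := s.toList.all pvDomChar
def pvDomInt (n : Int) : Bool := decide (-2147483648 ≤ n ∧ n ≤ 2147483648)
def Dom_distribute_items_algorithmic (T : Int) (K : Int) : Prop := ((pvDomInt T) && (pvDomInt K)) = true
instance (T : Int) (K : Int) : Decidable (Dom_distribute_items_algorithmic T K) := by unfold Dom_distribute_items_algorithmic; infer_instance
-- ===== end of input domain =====

-- B replaces A's branching recursion by a stars-and-bars enumeration (combinations of bar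
-- positions, bins read off as gaps); equivalence is on the return value; same cost class.

-- ===== PORT A =====
-- A's recursion, with fuel for totality (fuel K.toNat+1 is exactly sufficient whenever the
-- Python terminates; the fuel-0 fallback is a totality guard only, never reached on Pre_).
def pvGoA : Nat → Int → Int → List (List Int)
  | fuel, T, K =>
    if K == 0 then (if T == 0 then [[]] else [])
    else
      match fuel with
      | 0 => []
      | f + 1 =>
        (PySem.List.pyRange 0 (T + 1) 1).foldl
          (fun result i =>
            (pvGoA f (T - i) (K - 1)).foldl (fun r d => r ++ [i :: d]) result) []

def distribute_items_algorithmic (T : Int) (K : Int) : List (List Int) :=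
  pvGoA (K.toNat + 1) T K

-- ===== PORT B =====
-- itertools.combinations(xs, k) in lexicographic order
def pvCombs : Nat → List Int → List (List Int)
  | 0, _ => [[]]
  | _ + 1, [] => []
  | k + 1, x :: xs =>
    if xs.length + 1 < k + 1 then []   -- too few elements left: no combination (itertools yields none)
    else (pvCombs k xs).map (x :: ·) ++ pvCombs (k + 1) xs

-- the inner loop of B: bins as gaps between consecutive bars (prev starts at -1)
def pvGaps (prev : Int) (total : Int) : List Int → List Int
  | [] => [total - prev - 1]
  | b :: bs => (b - prev - 1) :: pvGaps b total bs

def distribute_items_algorithmic_alt (T : Int) (K : Int) : List (List Int) :=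
  if K == 0 then (if T == 0 then [[]] else [])
  else if T < 0 then []
  else (pvCombs (K - 1).toNat (PySem.List.pyRange 0 (T + K - 1) 1)).map
        (pvGaps (-1) (T + K - 1))

-- ===== PRECONDITION & SPEC =====
-- Pre_ excludes K < 0 with T ≥ 0, where the Python A recurses forever (RecursionError).
def Pre_distribute_items_algorithmic (T : Int) (K : Int) : Prop := 0 ≤ K ∨ T < 0
instance (T : Int) (K : Int) : Decidable (Pre_distribute_items_algorithmic T K) := by
  unfold Pre_distribute_items_algorithmic; infer_instance

def pvWitness_distribute_items_algorithmic : Int × Int := (3, 2)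

def Spec_distribute_items_algorithmic (T : Int) (K : Int) (out : List (List Int)) : Prop :=
  out = distribute_items_algorithmic_alt T K
instance (T : Int) (K : Int) (out : List (List Int)) :
    Decidable (Spec_distribute_items_algorithmic T K out) := by
  unfold Spec_distribute_items_algorithmic; infer_instance

-- ===== CLAIM (what is proved, stated in full; the proofs are below) =====
def Claim_equal_distribute_items_algorithmic : Prop :=
  ∀ (T : Int) (K : Int), Dom_distribute_items_algorithmic T K →
    Pre_distribute_items_algorithmic T K →
    Spec_distribute_items_algorithmic T K (distribute_items_algorithmic T K)

-- ===== LEMMAS AND PROOFS =====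

-- clean form of A's recursion at nonnegative K (index = K)
def pvComp : Nat → Int → List (List Int)
  | 0, T => if T == 0 then [[]] else []
  | k + 1, T =>
    (PySem.List.pyRange 0 (T + 1) 1).flatMap (fun i => (pvComp k (T - i)).map (i :: ·))

-- increment the first element (shift of the leading gap)
def pvIncFirst : List Int → List Int
  | [] => []
  | x :: xs => (x + 1) :: xs

lemma pvGoA_eq_comp : ∀ (k f : Nat) (T : Int), k < f → pvGoA f T (k : Int) = pvComp k T := by
  intro k
  induction k with
  | zero =>
    intro f T _
    rw [pvGoA.eq_def]
    simp [pvComp]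
  | succ k ih =>
    intro f T hf
    match f, hf with
    | g + 1, hf =>
      have hk : k < g := by omega
      have hne : (((k : Int) + 1) == 0) = false := by simp; omega
      have hcast : ((k + 1 : Nat) : Int) = (k : Int) + 1 := by push_cast; ring
      rw [hcast, pvGoA]
      simp only [hne, Bool.false_eq_true, if_false]
      have harg : (k : Int) + 1 - 1 = (k : Int) := by ring
      simp only [harg]
      calc (PySem.List.pyRange 0 (T + 1) 1).foldl
              (fun result i => (pvGoA g (T - i) (k : Int)).foldl (fun r d => r ++ [i :: d]) result) []
          = (PySem.List.pyRange 0 (T + 1) 1).foldl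
              (fun result i => result ++ (pvComp k (T - i)).map (i :: ·)) [] := by
            apply PySem.List.foldl_congr_mem
            intro acc i _
            rw [ih g (T - i) hk, PySem.List.foldl_append_singleton_eq_map]
        _ = [] ++ (PySem.List.pyRange 0 (T + 1) 1).flatMap (fun i => (pvComp k (T - i)).map (i :: ·)) :=
            PySem.List.foldl_append_eq_flatMap _ _ _
        _ = pvComp (k + 1) T := by rw [List.nil_append]; rfl

lemma pvComp_one (t : Nat) : pvComp 1 (t : Int) = [[(t : Int)]] := by
  rw [pvComp]
  rw [PySem.List.pyRange_one_succ_right (by exact_mod_cast Nat.zero_le t)]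
  rw [List.flatMap_append]
  have h1 : (PySem.List.pyRange 0 (t : Int) 1).flatMap
      (fun i => (pvComp 0 ((t : Int) - i)).map (i :: ·)) = [] := by
    rw [List.flatMap_eq_nil_iff]
    intro i hi
    rw [PySem.List.mem_pyRange_one] at hi
    have h0 : (((t : Int) - i) == 0) = false := by simp; omega
    simp [pvComp, h0]
  rw [h1]
  simp [pvComp]

lemma pvCombs_nil_of_short : ∀ (xs : List Int) (k : Nat), xs.length < k → pvCombs k xs = [] := by
  intro xs
  induction xs with
  | nil => intro k hk; match k, hk with | j + 1, _ => rfl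
  | cons x xs ih =>
    intro k hk
    match k, hk with
    | j + 1, hk =>
      rw [pvCombs]
      rw [if_pos (by simp at hk ⊢; omega)]

lemma pvCombs_ne_nil : ∀ (xs : List Int) (k : Nat) (l : List Int),
    l ∈ pvCombs (k + 1) xs → l ≠ [] := by
  intro xs
  induction xs with
  | nil => intro k l hl; simp [pvCombs] at hl
  | cons x xs ih =>
    intro k l hl
    rw [pvCombs] at hl
    split_ifs at hl with h
    · simp at hl
    rw [List.mem_append] at hl
    rcases hl with hl | hl
    · rcases List.mem_map.1 hl with ⟨d, _, rfl⟩
      simp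
    · exact ih k l hl

lemma pvGaps_shift (prev total b : Int) (bs : List Int) :
    pvGaps prev total (b :: bs) = pvIncFirst (pvGaps (prev + 1) total (b :: bs)) := by
  simp [pvGaps, pvIncFirst]
  try ring

lemma pvComp_split (m : Nat) (t : Nat) :
    pvComp (m + 1) ((t : Int) + 1)
      = (pvComp m ((t : Int) + 1)).map (0 :: ·)
        ++ (pvComp (m + 1) (t : Int)).map pvIncFirst := by
  conv_lhs => rw [pvComp]
  rw [PySem.List.pyRange_one_cons (by omega)]
  rw [List.flatMap_cons]
  have h1 : (pvComp m ((t : Int) + 1 - 0)).map ((0 : Int) :: ·)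
      = (pvComp m ((t : Int) + 1)).map ((0 : Int) :: ·) := by norm_num
  rw [h1]
  congr 1
  have hsh : PySem.List.pyRange (0 + 1) ((t : Int) + 1 + 1) 1
      = (PySem.List.pyRange 0 ((t : Int) + 1) 1).map (fun j => j + 1) := by
    rw [PySem.List.pyRange_one, PySem.List.pyRange_one]
    have he : ((t : Int) + 1 + 1 - (0 + 1)).toNat = ((t : Int) + 1 - 0).toNat := by omega
    rw [he, List.map_map]
    apply List.map_congr_left
    intro a _
    simp
    ring
  rw [hsh, List.flatMap_map]
  conv_rhs => rw [pvComp, List.map_flatMap]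
  have hfun : (fun j : Int => List.map (fun x => (j + 1) :: x) (pvComp m ((t : Int) + 1 - (j + 1))))
      = (fun j : Int => List.map pvIncFirst (List.map (fun x => j :: x) (pvComp m ((t : Int) - j)))) := by
    funext j
    have he : (t : Int) + 1 - (j + 1) = (t : Int) - j := by ring
    rw [he, List.map_map]
    apply List.map_congr_left
    intro d _
    simp [pvIncFirst]
  have hcomp : ∀ (l : List Int) (f g : Int → List (List Int)), f = g → l.flatMap f = l.flatMap g := by
    intro l f g h; rw [h]
  exact hcomp _ _ _ (by
    funext j
    have := congrFun hfun j
    simpa using this)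

lemma pvComp_zero_succ (m : Nat) : pvComp (m + 1) 0 = (pvComp m 0).map ((0 : Int) :: ·) := by
  rw [pvComp]
  have h01 : (0 : Int) + 1 = 1 := by ring
  rw [h01, PySem.List.pyRange_one_cons (by omega), PySem.List.pyRange_one_eq_nil (by omega)]
  simp

lemma pvMain : ∀ (k : Nat) (t : Nat) (prev : Int),
    (pvCombs k (PySem.List.pyRange (prev + 1) (prev + 1 + t + k) 1)).map
        (pvGaps prev (prev + 1 + t + k))
      = pvComp (k + 1) (t : Int) := by
  intro k
  induction k with
  | zero =>
    intro t prev
    have hE : prev + 1 + (t : Int) + ((0 : Nat) : Int) = prev + 1 + (t : Int) := by push_cast; ring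
    rw [hE]
    simp only [pvCombs, List.map_cons, List.map_nil, pvGaps]
    rw [pvComp_one]
    congr 2
    ring
  | succ k ihk =>
    intro t
    induction t with
    | zero =>
      intro prev
      have hE : prev + 1 + ((0 : Nat) : Int) + ((k + 1 : Nat) : Int) = prev + 2 + (k : Int) := by
        push_cast; ring
      rw [hE]
      rw [PySem.List.pyRange_one_cons (by omega)]
      rw [pvCombs, if_neg (by rw [PySem.List.length_pyRange_one]; omega), List.map_append]
      have hshort : pvCombs (k + 1) (PySem.List.pyRange (prev + 1 + 1) (prev + 2 + (k : Int)) 1) = [] := by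
        apply pvCombs_nil_of_short
        rw [PySem.List.length_pyRange_one]
        omega
      rw [hshort]
      simp only [List.map_nil, List.append_nil, List.map_map]
      have hfun : (pvGaps prev (prev + 2 + (k : Int)) ∘ ((prev + 1) :: ·))
          = ((0 : Int) :: ·) ∘ pvGaps (prev + 1) (prev + 2 + (k : Int)) := by
        funext bs
        simp [Function.comp, pvGaps]
        try ring
      rw [hfun, ← List.map_map]
      have hih := ihk 0 (prev + 1)
      have hE2 : prev + 1 + 1 + ((0 : Nat) : Int) + ((k : Nat) : Int) = prev + 2 + (k : Int) := by
        push_cast; ring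
      rw [hE2] at hih
      rw [hih]
      have hc0 : ((0 : Nat) : Int) = 0 := rfl
      rw [hc0, pvComp_zero_succ (k + 1)]
    | succ t iht =>
      intro prev
      have hE : prev + 1 + ((t + 1 : Nat) : Int) + ((k + 1 : Nat) : Int)
          = prev + (t : Int) + (k : Int) + 3 := by push_cast; ring
      rw [hE]
      rw [PySem.List.pyRange_one_cons (by omega)]
      rw [pvCombs, if_neg (by rw [PySem.List.length_pyRange_one]; omega), List.map_append]
      -- chunk 1
      have hfun : (pvGaps prev (prev + (t : Int) + (k : Int) + 3) ∘ ((prev + 1) :: ·))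
          = ((0 : Int) :: ·) ∘ pvGaps (prev + 1) (prev + (t : Int) + (k : Int) + 3) := by
        funext bs
        simp [Function.comp, pvGaps]
        try ring
      have hih1 := ihk (t + 1) (prev + 1)
      have hE1 : prev + 1 + 1 + ((t + 1 : Nat) : Int) + ((k : Nat) : Int)
          = prev + (t : Int) + (k : Int) + 3 := by push_cast; ring
      rw [hE1] at hih1
      have hch1 : ((pvCombs k (PySem.List.pyRange (prev + 1 + 1) (prev + (t : Int) + (k : Int) + 3) 1)).map
            ((prev + 1) :: ·)).map (pvGaps prev (prev + (t : Int) + (k : Int) + 3))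
          = (pvComp (k + 1) ((t : Int) + 1)).map ((0 : Int) :: ·) := by
        rw [List.map_map, hfun, ← List.map_map, hih1]
        congr 1
      -- chunk 2
      have hih2 := iht (prev + 1)
      have hE2 : prev + 1 + 1 + ((t : Nat) : Int) + ((k + 1 : Nat) : Int)
          = prev + (t : Int) + (k : Int) + 3 := by push_cast; ring
      rw [hE2] at hih2
      have hch2 : (pvCombs (k + 1) (PySem.List.pyRange (prev + 1 + 1) (prev + (t : Int) + (k : Int) + 3) 1)).map
            (pvGaps prev (prev + (t : Int) + (k : Int) + 3))
          = (pvComp (k + 2) (t : Int)).map pvIncFirst := by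
        rw [← hih2, List.map_map]
        apply List.map_congr_left
        intro l hl
        have hne := pvCombs_ne_nil _ _ _ hl
        match l, hne with
        | b :: bs, _ =>
          exact pvGaps_shift prev (prev + (t : Int) + (k : Int) + 3) b bs
      rw [hch1, hch2]
      have hsplit := pvComp_split (k + 1) t
      have hc : ((t + 1 : Nat) : Int) = (t : Int) + 1 := by push_cast; ring
      rw [hc, hsplit]

-- ===== VERDICT (by name: the statement is the Claim_ definition above) =====
theorem distribute_items_algorithmic_spec : Claim_equal_distribute_items_algorithmic := by
  intro T K hdom hpre
  unfold Spec_distribute_items_algorithmic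
  by_cases hK0 : K = 0
  · subst hK0
    simp [distribute_items_algorithmic, distribute_items_algorithmic_alt, pvGoA]
  · by_cases hKpos : 0 < K
    · by_cases hT : T < 0
      · -- K ≥ 1, T < 0 : both empty
        have hA : distribute_items_algorithmic T K = [] := by
          unfold distribute_items_algorithmic
          rw [pvGoA]
          have h0 : (K == 0) = false := by simp [hK0]
          simp only [h0, Bool.false_eq_true, if_false]
          rw [PySem.List.pyRange_one_eq_nil (by omega)]
          rfl
        have hB : distribute_items_algorithmic_alt T K = [] := by
          unfold distribute_items_algorithmic_alt
          have h0 : (K == 0) = false := by simp [hK0]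
          simp [h0, hT]
        rw [hA, hB]
      · -- main case K ≥ 1, T ≥ 0
        have hkcast : ((K.toNat : Nat) : Int) = K := by omega
        have hA : distribute_items_algorithmic T K = pvComp K.toNat T := by
          unfold distribute_items_algorithmic
          rw [← hkcast] at *
          exact pvGoA_eq_comp K.toNat (K.toNat + 1) T (by omega)
        obtain ⟨k', hk'⟩ : ∃ k', K.toNat = k' + 1 := ⟨K.toNat - 1, by omega⟩
        have hB : distribute_items_algorithmic_alt T K
            = (pvCombs (K - 1).toNat (PySem.List.pyRange 0 (T + K - 1) 1)).map
                (pvGaps (-1) (T + K - 1)) := by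
          unfold distribute_items_algorithmic_alt
          have h0 : (K == 0) = false := by simp [hK0]
          simp [h0, hT]
        have hmain := pvMain k' T.toNat (-1)
        have hk'' : (K - 1).toNat = k' := by omega
        have hend : (-1 : Int) + 1 + (T.toNat : Int) + (k' : Int) = T + K - 1 := by omega
        rw [hend] at hmain
        have hstart : (-1 : Int) + 1 = 0 := by ring
        rw [hstart] at hmain
        have htc : ((T.toNat : Nat) : Int) = T := by omega
        rw [htc] at hmain
        rw [hA, hB, hk'', hmain, hk']
    · -- K < 0, so T < 0 by Pre_; both []
      have hT : T < 0 := by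
        rcases hpre with h | h
        · omega
        · exact h
      have hKt : K.toNat = 0 := by omega
      have hA : distribute_items_algorithmic T K = [] := by
        unfold distribute_items_algorithmic
        rw [hKt, pvGoA]
        have h0 : (K == 0) = false := by simp [hK0]
        simp only [h0, Bool.false_eq_true, if_false]
        rw [PySem.List.pyRange_one_eq_nil (by omega)]
        rfl
      have hB : distribute_items_algorithmic_alt T K = [] := by
        unfold distribute_items_algorithmic_alt
        have h0 : (K == 0) = false := by simp [hK0]
        simp [h0, hT]
      rw [hA, hB]
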